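-- pv_equiv track=rewrite | github.com/Bleii-bustamante/cavelier-marcas | app.py | calcular_clases_conflicto
-- ===== SOURCE A (Python) =====
-- CLASES_VINCULADAS = [
--     {1, 2}, {1, 5}, {1, 6}, {1, 16}, {1, 17}, {1, 19}, {1, 31}, {1, 40},
--     {2, 4}, {2, 16}, {2, 19},
--     {3, 5}, {3, 10}, {3, 14}, {3, 18}, {3, 21}, {3, 25}, {3, 44},
--     {4, 12}, {4, 13}, {4, 37}, {4, 39}, {4, 40},
--     {5, 10}, {5, 29}, {5, 30}, {5, 31}, {5, 44},
--     {6, 8}, {6, 19}, {7, 8}, {7, 12}, {7, 17}, {8, 21},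
--     {9, 10}, {9, 15}, {9, 16}, {9, 28}, {9, 35}, {9, 38}, {9, 41}, {9, 42}, {9, 45},
--     {10, 44}, {11, 19}, {11, 21}, {11, 37}, {12, 37}, {12, 39}, {12, 40},
--     {14, 18}, {14, 25}, {15, 41}, {16, 17}, {16, 35}, {16, 38}, {16, 41},
--     {18, 25}, {19, 27}, {19, 37}, {20, 21}, {20, 22}, {20, 24}, {20, 27},
--     {21, 24}, {22, 24}, {22, 27}, {22, 28}, {23, 24}, {23, 26}, {24, 25}, {24, 26},
--     {26, 31}, {28, 41}, {29, 30}, {29, 31}, {29, 32}, {29, 43},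
--     {30, 31}, {30, 32}, {30, 43}, {31, 32}, {31, 43}, {31, 44},
--     {32, 33}, {32, 43}, {33, 34}, {33, 43}, {35, 36}, {35, 38}, {35, 41}, {35, 42},
--     {36, 37}, {37, 40}, {38, 41}, {38, 42}, {39, 43},
-- ]
--
-- def calcular_clases_conflicto(cc, cg):
--     resultado = set()
--     for a in cc:
--         for b in cg:
--             if a == b:
--                 resultado.add(a); resultado.add(b)
--             for par in CLASES_VINCULADAS:
--                 if a in par and b in par:
--                     resultado.add(a); resultado.add(b)
--     return resultado
-- ===== SOURCE B (Python) =====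
-- # B: per-class neighbourhood built from an explicit pair table replaces A's innermost scan of CLASES_VINCULADAS for every (a, b) pair (faster constant/asymptotic in the table size).
-- PARES_VINCULADOS = [
--     (1, 2), (1, 5), (1, 6), (1, 16), (1, 17), (1, 19), (1, 31), (1, 40),
--     (2, 4), (2, 16), (2, 19), (3, 5), (3, 10), (3, 14), (3, 18), (3, 21),
--     (3, 25), (3, 44), (4, 12), (4, 13), (4, 37), (4, 39), (4, 40), (5, 10),
--     (5, 29), (5, 30), (5, 31), (5, 44), (6, 8), (6, 19), (7, 8), (7, 12),
--     (7, 17), (8, 21), (9, 10), (9, 15), (9, 16), (9, 28), (9, 35), (9, 38),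
--     (9, 41), (9, 42), (9, 45), (10, 44), (11, 19), (11, 21), (11, 37), (12, 37),
--     (12, 39), (12, 40), (14, 18), (14, 25), (15, 41), (16, 17), (16, 35), (16, 38),
--     (16, 41), (18, 25), (19, 27), (19, 37), (20, 21), (20, 22), (20, 24), (20, 27),
--     (21, 24), (22, 24), (22, 27), (22, 28), (23, 24), (23, 26), (24, 25), (24, 26),
--     (26, 31), (28, 41), (29, 30), (29, 31), (29, 32), (29, 43), (30, 31), (30, 32),
--     (30, 43), (31, 32), (31, 43), (31, 44), (32, 33), (32, 43), (33, 34), (33, 43),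
--     (35, 36), (35, 38), (35, 41), (35, 42), (36, 37), (37, 40), (38, 41), (38, 42),
--     (39, 43),
-- ]
--
--
-- def _objetivo(a):
--     objetivo = {a}
--     for u, v in PARES_VINCULADOS:
--         if u == a:
--             objetivo.add(v)
--         elif v == a:
--             objetivo.add(u)
--     return objetivo
--
--
-- def calcular_clases_conflicto(cc, cg):
--     resultado = set()
--     for a in cc:
--         objetivo = _objetivo(a)
--         golpes = [b for b in cg if b in objetivo]
--         if golpes:
--             resultado.add(a)
--             resultado.update(golpes)
--     return resultado
-- ===== Notes on version B (the rewrite author's own statement) =====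
-- stated objective: faster
-- what changed: B precomputes, per outer class a, its linked-neighbourhood set from an explicit pair table and then filters cg against it once, removing A's innermost scan of the 97-entry CLASES_VINCULADAS list for every (a, b) pair.
import Mathlib
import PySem

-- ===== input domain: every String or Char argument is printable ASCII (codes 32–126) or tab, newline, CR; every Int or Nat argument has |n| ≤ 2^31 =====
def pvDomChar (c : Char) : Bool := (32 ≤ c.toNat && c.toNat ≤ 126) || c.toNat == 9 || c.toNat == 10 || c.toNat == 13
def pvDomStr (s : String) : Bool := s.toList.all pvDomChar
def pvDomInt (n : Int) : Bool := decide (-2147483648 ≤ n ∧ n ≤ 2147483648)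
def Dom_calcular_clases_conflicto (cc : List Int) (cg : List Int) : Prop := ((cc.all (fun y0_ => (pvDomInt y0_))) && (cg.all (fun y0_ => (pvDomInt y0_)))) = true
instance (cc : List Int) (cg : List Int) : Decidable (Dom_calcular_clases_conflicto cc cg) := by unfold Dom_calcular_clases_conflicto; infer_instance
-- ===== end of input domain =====

-- B replaces A's innermost scan of CLASES_VINCULADAS per (a, b) pair by a per-a neighbourhood set built once from an explicit pair table (faster).

-- ===== PORT A =====
def CLASES_VINCULADAS : List (PySem.Set Int) := [
    [1, 2], [1, 5], [1, 6], [1, 16], [1, 17], [1, 19], [1, 31], [1, 40],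
    [2, 4], [2, 16], [2, 19], [3, 5], [3, 10], [3, 14], [3, 18], [3, 21],
    [3, 25], [3, 44], [4, 12], [4, 13], [4, 37], [4, 39], [4, 40], [5, 10],
    [5, 29], [5, 30], [5, 31], [5, 44], [6, 8], [6, 19], [7, 8], [7, 12],
    [7, 17], [8, 21], [9, 10], [9, 15], [9, 16], [9, 28], [9, 35], [9, 38],
    [9, 41], [9, 42], [9, 45], [10, 44], [11, 19], [11, 21], [11, 37], [12, 37],
    [12, 39], [12, 40], [14, 18], [14, 25], [15, 41], [16, 17], [16, 35], [16, 38],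
    [16, 41], [18, 25], [19, 27], [19, 37], [20, 21], [20, 22], [20, 24], [20, 27],
    [21, 24], [22, 24], [22, 27], [22, 28], [23, 24], [23, 26], [24, 25], [24, 26],
    [26, 31], [28, 41], [29, 30], [29, 31], [29, 32], [29, 43], [30, 31], [30, 32],
    [30, 43], [31, 32], [31, 43], [31, 44], [32, 33], [32, 43], [33, 34], [33, 43],
    [35, 36], [35, 38], [35, 41], [35, 42], [36, 37], [37, 40], [38, 41], [38, 42],
    [39, 43]]
def calcular_clases_conflicto (cc : List Int) (cg : List Int) : List Int :=
  cc.foldl (fun resultado a =>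
    cg.foldl (fun resultado b =>
      let resultado := if a == b then PySem.Set.add (PySem.Set.add resultado a) b else resultado
      CLASES_VINCULADAS.foldl (fun resultado par =>
        if PySem.Set.contains par a && PySem.Set.contains par b then
          PySem.Set.add (PySem.Set.add resultado a) b
        else resultado) resultado) resultado) PySem.Set.empty

-- ===== PORT B =====
def PARES_VINCULADOS : List (Int × Int) := [
    (1, 2), (1, 5), (1, 6), (1, 16), (1, 17), (1, 19), (1, 31), (1, 40),
    (2, 4), (2, 16), (2, 19), (3, 5), (3, 10), (3, 14), (3, 18), (3, 21),
    (3, 25), (3, 44), (4, 12), (4, 13), (4, 37), (4, 39), (4, 40), (5, 10),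
    (5, 29), (5, 30), (5, 31), (5, 44), (6, 8), (6, 19), (7, 8), (7, 12),
    (7, 17), (8, 21), (9, 10), (9, 15), (9, 16), (9, 28), (9, 35), (9, 38),
    (9, 41), (9, 42), (9, 45), (10, 44), (11, 19), (11, 21), (11, 37), (12, 37),
    (12, 39), (12, 40), (14, 18), (14, 25), (15, 41), (16, 17), (16, 35), (16, 38),
    (16, 41), (18, 25), (19, 27), (19, 37), (20, 21), (20, 22), (20, 24), (20, 27),
    (21, 24), (22, 24), (22, 27), (22, 28), (23, 24), (23, 26), (24, 25), (24, 26),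
    (26, 31), (28, 41), (29, 30), (29, 31), (29, 32), (29, 43), (30, 31), (30, 32),
    (30, 43), (31, 32), (31, 43), (31, 44), (32, 33), (32, 43), (33, 34), (33, 43),
    (35, 36), (35, 38), (35, 41), (35, 42), (36, 37), (37, 40), (38, 41), (38, 42),
    (39, 43)]

def objetivo_de (a : Int) : PySem.Set Int :=
  PARES_VINCULADOS.foldl (fun objetivo p =>
    if p.1 == a then PySem.Set.add objetivo p.2
    else if p.2 == a then PySem.Set.add objetivo p.1
    else objetivo) (PySem.Set.add PySem.Set.empty a)

def calcular_clases_conflicto_alt (cc : List Int) (cg : List Int) : List Int :=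
  cc.foldl (fun resultado a =>
    let objetivo := objetivo_de a
    let golpes := cg.filter (fun b => PySem.Set.contains objetivo b)
    if golpes.isEmpty then resultado
    else PySem.Set.update (PySem.Set.add resultado a) golpes) PySem.Set.empty

-- ===== PRECONDITION & SPEC =====
def Spec_calcular_clases_conflicto (cc : List Int) (cg : List Int) (out : List Int) : Prop := out = calcular_clases_conflicto_alt cc cg
instance (cc : List Int) (cg : List Int) (out : List Int) : Decidable (Spec_calcular_clases_conflicto cc cg out) := by unfold Spec_calcular_clases_conflicto; infer_instance

-- ===== CLAIM (what is proved, stated in full; the proofs are below) =====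
def Claim_equal_calcular_clases_conflicto : Prop := ∀ (cc : List Int) (cg : List Int), Dom_calcular_clases_conflicto cc cg → Spec_calcular_clases_conflicto cc cg (calcular_clases_conflicto cc cg)

-- ===== LEMMAS AND PROOFS =====

-- the conflict test A performs for one pair (a, b)
def conflictP (a b : Int) : Bool :=
  (a == b) || CLASES_VINCULADAS.any (fun par => PySem.Set.contains par a && PySem.Set.contains par b)

-- a fold that applies an idempotent step on every match applies it once iff there is a match
theorem foldl_if_idem {α β : Type} (g : β → β) (P : α → Bool) (hg : ∀ t, g (g t) = g t) :
    ∀ (L : List α) (s : β), L.foldl (fun t x => if P x then g t else t) s = if L.any P then g s else s := by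
  intro L
  induction L with
  | nil => intro s; simp
  | cons x t ih =>
    intro s
    by_cases h : P x = true
    · simp only [List.foldl_cons, List.any_cons, h, Bool.true_or, ih]
      by_cases h2 : t.any P = true
      · simp [h2, hg]
      · simp [h2]
    · simp only [List.foldl_cons, List.any_cons, h]
      simp only [Bool.not_eq_true] at h
      simp [ih]

theorem add_add_idem (s : PySem.Set Int) (a b : Int) :
    PySem.Set.add (PySem.Set.add (PySem.Set.add (PySem.Set.add s a) b) a) b
      = PySem.Set.add (PySem.Set.add s a) b := by
  have ha : a ∈ PySem.Set.add (PySem.Set.add s a) b := by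
    rw [PySem.Set.mem_add]; left; rw [PySem.Set.mem_add]; right; rfl
  rw [PySem.Set.add_of_mem ha]
  have hb : b ∈ PySem.Set.add (PySem.Set.add s a) b := by
    rw [PySem.Set.mem_add]; right; rfl
  rw [PySem.Set.add_of_mem hb]

-- A's per-(a,b) body collapses to one conditional double insertion
theorem bodyA_eq (a b : Int) (s : PySem.Set Int) :
    (CLASES_VINCULADAS.foldl (fun resultado par =>
        if PySem.Set.contains par a && PySem.Set.contains par b then
          PySem.Set.add (PySem.Set.add resultado a) b
        else resultado)
      (if a == b then PySem.Set.add (PySem.Set.add s a) b else s))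
    = if conflictP a b then PySem.Set.add (PySem.Set.add s a) b else s := by
  rw [foldl_if_idem (fun t => PySem.Set.add (PySem.Set.add t a) b)
        (fun par => PySem.Set.contains par a && PySem.Set.contains par b)
        (fun t => add_add_idem t a b)]
  by_cases h : (a == b) = true
  · simp only [conflictP, h, Bool.true_or]
    split
    · simp
    · simp
  · simp only [conflictP, h, Bool.false_or]
    simp only [Bool.not_eq_true] at h
    simp

-- membership in the fold that builds B's neighbourhood set
theorem mem_objetivo_fold (a y : Int) :
    ∀ (L : List (Int × Int)) (s : PySem.Set Int),
      (y ∈ L.foldl (fun objetivo p =>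
          if p.1 == a then PySem.Set.add objetivo p.2
          else if p.2 == a then PySem.Set.add objetivo p.1
          else objetivo) s)
      ↔ y ∈ s ∨ ∃ p ∈ L, (p.1 = a ∧ p.2 = y) ∨ (p.2 = a ∧ p.1 = y) := by
  intro L
  induction L with
  | nil => intro s; simp
  | cons p t ih =>
    intro s
    simp only [List.foldl_cons, List.mem_cons]
    by_cases h1 : (p.1 == a) = true
    · rw [if_pos h1, ih, PySem.Set.mem_add]
      rw [beq_iff_eq] at h1
      constructor
      · rintro (⟨hs | he⟩ | ⟨q, hq, hqd⟩)
        · exact Or.inl hs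
        · exact Or.inr ⟨p, Or.inl rfl, Or.inl ⟨h1, he.symm⟩⟩
        · exact Or.inr ⟨q, Or.inr hq, hqd⟩
      · rintro (hs | ⟨q, (rfl | hq), hqd⟩)
        · exact Or.inl (Or.inl hs)
        · rcases hqd with ⟨_, h2⟩ | ⟨h2, h3⟩
          · exact Or.inl (Or.inr h2.symm)
          · exact Or.inl (Or.inr ((h3.symm.trans h1).trans h2.symm))
        · exact Or.inr ⟨q, hq, hqd⟩
    · rw [if_neg h1]
      rw [beq_iff_eq] at *
      by_cases h2 : (p.2 == a) = true
      · rw [if_pos h2, ih, PySem.Set.mem_add]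
        rw [beq_iff_eq] at h2
        constructor
        · rintro (⟨hs | he⟩ | ⟨q, hq, hqd⟩)
          · exact Or.inl hs
          · exact Or.inr ⟨p, Or.inl rfl, Or.inr ⟨h2, he.symm⟩⟩
          · exact Or.inr ⟨q, Or.inr hq, hqd⟩
        · rintro (hs | ⟨q, (rfl | hq), hqd⟩)
          · exact Or.inl (Or.inl hs)
          · rcases hqd with ⟨h3, h4⟩ | ⟨_, h4⟩
            · exact absurd h3 (by simpa using h1)
            · exact Or.inl (Or.inr h4.symm)
          · exact Or.inr ⟨q, hq, hqd⟩
      · rw [if_neg h2, ih]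
        rw [beq_iff_eq] at *
        constructor
        · rintro (hs | ⟨q, hq, hqd⟩)
          · exact Or.inl hs
          · exact Or.inr ⟨q, Or.inr hq, hqd⟩
        · rintro (hs | ⟨q, (rfl | hq), hqd⟩)
          · exact Or.inl hs
          · rcases hqd with ⟨h3, _⟩ | ⟨h3, _⟩
            · exact absurd h3 h1
            · exact absurd h3 h2
          · exact Or.inr ⟨q, hq, hqd⟩

theorem table_eq_map : CLASES_VINCULADAS = PARES_VINCULADOS.map (fun p => ([p.1, p.2] : PySem.Set Int)) := by
  decide

-- A's pairwise conflict test agrees with membership in B's neighbourhood set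
theorem conflict_eq_contains (a b : Int) :
    conflictP a b = PySem.Set.contains (objetivo_de a) b := by
  rw [Bool.eq_iff_iff]
  have hobj : (PySem.Set.contains (objetivo_de a) b = true) ↔
      b = a ∨ ∃ p ∈ PARES_VINCULADOS, (p.1 = a ∧ p.2 = b) ∨ (p.2 = a ∧ p.1 = b) := by
    rw [PySem.Set.contains_iff]
    unfold objetivo_de
    rw [mem_objetivo_fold]
    constructor
    · rintro (hs | h)
      · left
        have : PySem.Set.add PySem.Set.empty a = [a] := rfl
        rw [this] at hs; simpa using hs
      · exact Or.inr h
    · rintro (h | h)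
      · left
        have : PySem.Set.add PySem.Set.empty a = [a] := rfl
        rw [this]; simp [h]
      · exact Or.inr h
  rw [hobj]
  unfold conflictP
  rw [table_eq_map]
  simp only [Bool.or_eq_true, beq_iff_eq, List.any_eq_true, List.mem_map,
    Bool.and_eq_true, PySem.Set.contains_iff]
  constructor
  · rintro (rfl | ⟨par, ⟨p, hp, rfl⟩, hma, hmb⟩)
    · exact Or.inl rfl
    · simp only [List.mem_cons, List.not_mem_nil, or_false] at hma hmb
      by_cases hab : a = b
      · exact Or.inl (hab ▸ rfl)
      · right
        refine ⟨p, hp, ?_⟩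
        rcases hma with ha | ha <;> rcases hmb with hb | hb
        · exact absurd (ha.trans hb.symm) hab
        · exact Or.inl ⟨ha.symm, hb.symm⟩
        · exact Or.inr ⟨ha.symm, hb.symm⟩
        · exact absurd (ha.trans hb.symm) hab
  · rintro (rfl | ⟨p, hp, hd⟩)
    · exact Or.inl rfl
    · right
      refine ⟨[p.1, p.2], ⟨p, hp, rfl⟩, ?_⟩
      rcases hd with ⟨h1, h2⟩ | ⟨h1, h2⟩ <;> simp [← h1, ← h2]

-- folding a conditional double insertion over cg equals one filtered update
theorem foldl_filter_update (a : Int) (Q : Int → Bool) :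
    ∀ (cg : List Int) (s : PySem.Set Int),
      cg.foldl (fun s b => if Q b then PySem.Set.add (PySem.Set.add s a) b else s) s
      = if (cg.filter Q).isEmpty then s
        else PySem.Set.update (PySem.Set.add s a) (cg.filter Q) := by
  intro cg
  induction cg with
  | nil => intro s; simp
  | cons b t ih =>
    intro s
    by_cases h : Q b = true
    · have hmem : a ∈ PySem.Set.add (PySem.Set.add s a) b := by
        rw [PySem.Set.mem_add]; left; rw [PySem.Set.mem_add]; right; rfl
      rw [List.foldl_cons, if_pos h, ih, List.filter_cons_of_pos h, PySem.Set.add_of_mem hmem,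
          List.isEmpty_cons, if_neg Bool.false_ne_true, PySem.Set.update_cons]
      by_cases h2 : (t.filter Q).isEmpty = true
      · rw [if_pos h2, List.isEmpty_iff.mp h2, PySem.Set.update_nil]
      · rw [if_neg h2]
    · rw [List.foldl_cons, if_neg h]
      have hf : (b :: t).filter Q = t.filter Q := by
        rw [List.filter_cons, if_neg h]
      rw [hf, ih]

-- the two per-a outer steps coincide
theorem step_eq (a : Int) (cg : List Int) (resultado : PySem.Set Int) :
    cg.foldl (fun resultado b =>
      let resultado := if a == b then PySem.Set.add (PySem.Set.add resultado a) b else resultado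
      CLASES_VINCULADAS.foldl (fun resultado par =>
        if PySem.Set.contains par a && PySem.Set.contains par b then
          PySem.Set.add (PySem.Set.add resultado a) b
        else resultado) resultado) resultado
    = (let objetivo := objetivo_de a
       let golpes := cg.filter (fun b => PySem.Set.contains objetivo b)
       if golpes.isEmpty then resultado
       else PySem.Set.update (PySem.Set.add resultado a) golpes) := by
  have h1 : (fun (resultado : PySem.Set Int) (b : Int) =>
      let resultado := if a == b then PySem.Set.add (PySem.Set.add resultado a) b else resultado
      CLASES_VINCULADAS.foldl (fun resultado par =>
        if PySem.Set.contains par a && PySem.Set.contains par b then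
          PySem.Set.add (PySem.Set.add resultado a) b
        else resultado) resultado)
      = (fun (s : PySem.Set Int) (b : Int) =>
          if PySem.Set.contains (objetivo_de a) b then PySem.Set.add (PySem.Set.add s a) b else s) := by
    funext s b
    have := bodyA_eq a b s
    simp only at this ⊢
    rw [this, conflict_eq_contains]
  rw [h1, foldl_filter_update a (fun b => PySem.Set.contains (objetivo_de a) b)]

-- ===== VERDICT (by name: the statement is the Claim_ definition above) =====
theorem calcular_clases_conflicto_spec : Claim_equal_calcular_clases_conflicto := by
  intro cc cg _
  unfold Spec_calcular_clases_conflicto calcular_clases_conflicto calcular_clases_conflicto_alt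
  have h : (fun (resultado : PySem.Set Int) (a : Int) =>
      cg.foldl (fun resultado b =>
        let resultado := if a == b then PySem.Set.add (PySem.Set.add resultado a) b else resultado
        CLASES_VINCULADAS.foldl (fun resultado par =>
          if PySem.Set.contains par a && PySem.Set.contains par b then
            PySem.Set.add (PySem.Set.add resultado a) b
          else resultado) resultado) resultado)
      = (fun (resultado : PySem.Set Int) (a : Int) =>
          let objetivo := objetivo_de a
          let golpes := cg.filter (fun b => PySem.Set.contains objetivo b)
          if golpes.isEmpty then resultado
          else PySem.Set.update (PySem.Set.add resultado a) golpes) := by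
    funext resultado a
    exact step_eq a cg resultado
  rw [h]
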